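-- pv_equiv track=rewrite | github.com/Power-Electronics-and-Magnetics-Group/quickshift | stackups_michael.py | layerAssignments
-- ===== SOURCE A (Python) =====
-- from itertools import combinations
--
-- def layerAssignments(N, turnPair):
-- 	'''
-- 	Selects different combinations of layers for a given set of turns and a layer count.
--
-- 	Parameters:
-- 	-----------
-- 	N : int
-- 		Number of turns.
-- 	turnPair: int list of length 2
-- 		Pair of turn counts. turnPair[0] turns on the primary, turnPair[1] turns on the secondary.
--
-- 	Returns:
-- 	--------
-- 	primaryLayerAssignments
-- 		List of lists. Each inner list is a unique set of layers that can function as the primary for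
-- 		the specified N and turnPair, with a max of 1 turn per layer.
-- 	'''
-- 	#Input Validation
-- 	if (N <=2 or type(N) != int): raise valueError('Invalid N')
-- 	if (len(turnPair) != 2): raise valueError('Invalid Turn Pairs')
--
-- 	#Generate list [1,..,N]
-- 	layers = [0] * N
-- 	for i in range(1, N+1):
-- 		layers[i-1] = i
--
-- 	validPrimaryCounts = range(turnPair[0],N - turnPair[1] + 1)			#Possible number of layers on the primary
-- 	primaryLayerAssignments = []
-- 	for j in validPrimaryCounts:
-- 		primaryLayerAssignments.extend(list(combinations(layers,j)))	#Generate all combinations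
--
-- 	return primaryLayerAssignments
-- ===== SOURCE B (Python) =====
-- def layerAssignments(N, turnPair):
-- 	#Input Validation
-- 	if (N <= 2 or type(N) != int): raise ValueError('Invalid N')
-- 	if (len(turnPair) != 2): raise ValueError('Invalid Turn Pairs')
--
-- 	def combos(start, r):
-- 		# all r-element index combinations from start..N-1, in index-lex order,
-- 		# emitted directly as tuples of 1-based layer numbers
-- 		if r == 0:
-- 			return [()]
-- 		out = []
-- 		for i in range(start, N - r + 1):
-- 			out.extend((i + 1,) + rest for rest in combos(i + 1, r - 1))
-- 		return out
--
-- 	result = []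
-- 	for j in range(turnPair[0], N - turnPair[1] + 1):
-- 		result.extend(combos(0, j))
-- 	return result
-- ===== Notes on version B (the rewrite author's own statement) =====
-- stated objective: alternative
-- what changed: Replaces the itertools.combinations library call (and the list-building loop for layers) with a hand-written recursive enumerator over start indices that emits 1-based layer tuples directly in the same index-lexicographic order.
import Mathlib
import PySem

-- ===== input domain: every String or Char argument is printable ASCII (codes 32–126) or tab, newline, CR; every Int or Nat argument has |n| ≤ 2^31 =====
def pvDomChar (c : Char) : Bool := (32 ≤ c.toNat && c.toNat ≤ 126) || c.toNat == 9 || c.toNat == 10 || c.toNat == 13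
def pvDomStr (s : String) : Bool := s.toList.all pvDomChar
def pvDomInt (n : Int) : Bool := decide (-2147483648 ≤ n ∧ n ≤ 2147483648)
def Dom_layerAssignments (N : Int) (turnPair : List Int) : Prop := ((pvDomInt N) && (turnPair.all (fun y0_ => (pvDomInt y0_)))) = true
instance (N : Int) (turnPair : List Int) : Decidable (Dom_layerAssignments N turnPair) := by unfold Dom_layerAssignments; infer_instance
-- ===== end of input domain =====

-- B replaces the itertools.combinations library call with a direct recursive enumerator
-- over start indices; same outputs, same index-lexicographic order (objective: alternative).

-- ===== PORT A =====
-- itertools.combinations(xs, r) in index-lexicographic order; exact hand port of the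
-- library primitive (PySem has no combinations): tuples become Lean lists.
def pyCombinations : List Int → Nat → List (List Int)
  | _, 0 => [[]]
  | [], _+1 => []
  | x :: xs, r+1 => (pyCombinations xs r).map (fun c => x :: c) ++ pyCombinations xs (r+1)

def layerAssignments (N : Int) (turnPair : List Int) : List (List Int) :=
  -- layers = [0]*N; for i in range(1, N+1): layers[i-1] = i
  let layers := (PySem.List.pyRange 1 (N+1) 1).foldl
      (fun acc i => PySem.List.pySetD acc (i-1) i) (List.replicate N.toNat 0)
  -- for j in range(turnPair[0], N - turnPair[1] + 1): extend with combinations(layers, j)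
  (PySem.List.pyRange (PySem.List.pyGetD turnPair 0 0) (N - PySem.List.pyGetD turnPair 1 0 + 1) 1).foldl
      (fun acc j => acc ++ pyCombinations layers j.toNat) []

-- ===== PORT B =====
-- combos(start, r): walk i over range(start, N - r + 1), prepend layer i+1, recurse on r-1.
def combosB (N : Int) : Nat → Int → List (List Int)
  | 0, _ => [[]]
  | r+1, start =>
      (PySem.List.pyRange start (N - ((r : Int)+1) + 1) 1).foldl
        (fun out i => out ++ (combosB N r (i+1)).map (fun rest => (i+1) :: rest)) []

def layerAssignments_alt (N : Int) (turnPair : List Int) : List (List Int) :=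
  (PySem.List.pyRange (PySem.List.pyGetD turnPair 0 0) (N - PySem.List.pyGetD turnPair 1 0 + 1) 1).foldl
      (fun res j => res ++ combosB N j.toNat 0) []

-- ===== PRECONDITION & SPEC =====
-- A raises (NameError on the guards; ValueError from combinations on a negative count j)
-- exactly outside this condition: N > 2, len(turnPair) == 2, and no negative j is reached.
def Pre_layerAssignments (N : Int) (turnPair : List Int) : Prop :=
  2 < N ∧ turnPair.length = 2 ∧
  (PySem.List.pyGetD turnPair 0 0 < N - PySem.List.pyGetD turnPair 1 0 + 1 →
    0 ≤ PySem.List.pyGetD turnPair 0 0)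
instance (N : Int) (turnPair : List Int) : Decidable (Pre_layerAssignments N turnPair) := by
  unfold Pre_layerAssignments; infer_instance

def pvWitness_layerAssignments : Int × List Int := (4, [1, 2])

def Spec_layerAssignments (N : Int) (turnPair : List Int) (out : List (List Int)) : Prop := out = layerAssignments_alt N turnPair
instance (N : Int) (turnPair : List Int) (out : List (List Int)) : Decidable (Spec_layerAssignments N turnPair out) := by unfold Spec_layerAssignments; infer_instance

-- ===== CLAIM (what is proved, stated in full; the proofs are below) =====
def Claim_equal_layerAssignments : Prop := ∀ (N : Int) (turnPair : List Int), Dom_layerAssignments N turnPair → Pre_layerAssignments N turnPair → Spec_layerAssignments N turnPair (layerAssignments N turnPair)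

-- ===== LEMMAS AND PROOFS =====

-- choosing more elements than the list has yields nothing
lemma pyCombinations_short : ∀ (xs : List Int) (r : Nat), xs.length < r → pyCombinations xs r = [] := by
  intro xs
  induction xs with
  | nil => intro r h; cases r with
    | zero => omega
    | succ r => rfl
  | cons x xs ih =>
      intro r h
      cases r with
      | zero => omega
      | succ r =>
          simp only [pyCombinations]
          rw [ih r (by simp at h ⊢; omega), ih (r+1) (by simp at h ⊢; omega)]
          rfl

-- the layers-building loop produces [k+1, …, N] past position k
lemma setloop (N : Int) : ∀ (fuel : Nat) (k : Int) (init : List Int),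
    0 ≤ k → init.length = N.toNat → (N - k).toNat ≤ fuel →
    (PySem.List.pyRange (k+1) (N+1) 1).foldl (fun acc i => PySem.List.pySetD acc (i-1) i) init
      = init.take k.toNat ++ PySem.List.pyRange (k+1) (N+1) 1 := by
  intro fuel
  induction fuel with
  | zero =>
      intro k init hk hlen hf
      have hkN : N ≤ k := by omega
      rw [PySem.List.pyRange_one_eq_nil (by omega)]
      simp
      omega
  | succ fuel ih =>
      intro k init hk hlen hf
      by_cases hkN : N ≤ k
      · rw [PySem.List.pyRange_one_eq_nil (by omega)]
        simp
        omega
      · rw [PySem.List.pyRange_one_cons (by omega)]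
        simp only [List.foldl_cons]
        have hset : PySem.List.pySetD init (k+1-1) (k+1) = init.set k.toNat (k+1) := by
          rw [show k+1-1 = k by ring]
          exact PySem.List.pySetD_of_nonneg init (k+1) hk
        rw [hset, ih (k+1) (init.set k.toNat (k+1)) (by omega) (by simpa using hlen) (by omega)]
        rw [show k+1+1 = (k+1)+1 by ring]
        have hklt : k.toNat < init.length := by omega
        have htake : (init.set k.toNat (k+1)).take (k+1).toNat = init.take k.toNat ++ [k+1] := by
          rw [show (k+1).toNat = k.toNat + 1 by omega, List.take_add_one,
              List.take_set_of_le (le_refl _)]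
          simp [hklt]
        rw [htake, List.append_assoc]
        simp only [List.singleton_append]

-- B's enumerator equals combinations of the value suffix [s+1, …, N]
lemma combosB_eq (N : Int) : ∀ (fuel : Nat) (r : Nat) (s : Int),
    (N - s).toNat ≤ fuel →
    combosB N r s = pyCombinations (PySem.List.pyRange (s+1) (N+1) 1) r := by
  intro fuel
  induction fuel with
  | zero =>
      intro r s hf
      have hsN : N ≤ s := by omega
      rw [PySem.List.pyRange_one_eq_nil (by omega)]
      cases r with
      | zero => rfl
      | succ r =>
          simp only [combosB, pyCombinations]
          rw [PySem.List.pyRange_one_eq_nil (by omega)]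
          rfl
  | succ fuel ih =>
      intro r s hf
      by_cases hsN : N ≤ s
      · rw [PySem.List.pyRange_one_eq_nil (by omega)]
        cases r with
        | zero => rfl
        | succ r =>
            simp only [combosB, pyCombinations]
            rw [PySem.List.pyRange_one_eq_nil (by omega)]
            rfl
      · -- s < N : the suffix is (s+1) :: suffix(s+1)
        rw [PySem.List.pyRange_one_cons (by omega)]
        cases r with
        | zero => rfl
        | succ r =>
            simp only [combosB, pyCombinations]
            by_cases hr : s < N - ((r : Int)+1) + 1
            · -- the i-range is nonempty and starts at s
              rw [PySem.List.pyRange_one_cons hr, List.foldl_cons,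
                  PySem.List.foldl_append_eq_flatMap]
              simp only [List.nil_append]
              have h3 : (PySem.List.pyRange (s+1) (N - ((r : Int)+1) + 1) 1).flatMap
                    (fun i => (combosB N r (i+1)).map (fun rest => (i+1) :: rest))
                  = combosB N (r+1) (s+1) := by
                simp only [combosB, PySem.List.foldl_append_eq_flatMap, List.nil_append]
              rw [h3, ih r (s+1) (by omega), ih (r+1) (s+1) (by omega)]
            · -- the i-range is empty: the suffix is too short for r+1 picks
              rw [PySem.List.pyRange_one_eq_nil (by omega), List.foldl_nil]
              have hlen : (PySem.List.pyRange (s+1+1) (N+1) 1).length = (N - s - 1).toNat := by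
                rw [PySem.List.length_pyRange_one]; congr 1; ring
              rw [pyCombinations_short _ (r+1) (by rw [hlen]; omega),
                  pyCombinations_short _ r (by rw [hlen]; omega)]
              rfl

-- ===== VERDICT (by name: the statement is the Claim_ definition above) =====
theorem layerAssignments_spec : Claim_equal_layerAssignments := by
  intro N turnPair _ hpre
  obtain ⟨hN, hlen, _⟩ := hpre
  unfold Spec_layerAssignments layerAssignments layerAssignments_alt
  have hlayers : (PySem.List.pyRange 1 (N+1) 1).foldl
      (fun acc i => PySem.List.pySetD acc (i-1) i) (List.replicate N.toNat 0)
      = PySem.List.pyRange 1 (N+1) 1 := by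
    have := setloop N (N - 0).toNat 0 (List.replicate N.toNat 0) (le_refl 0)
      (by simp) (le_refl _)
    simpa using this
  simp only [hlayers]
  congr 1
  funext acc j
  rw [combosB_eq N (N - 0).toNat j.toNat 0 (by omega)]
  norm_num
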